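-- pv_equiv track=rewrite | github.com/AlexanderSarnov/DI-Bootcamp | Week2/Day3/Daily_Challenge/Challenge1.py | letter_histogram
-- ===== SOURCE A (Python) =====
-- def letter_histogram(word):
--   """Creates a dictionary storing letter indexes in a list.
--
--   Args:
--       word: The word to analyze (with a hidden maximum length).
--
--   Returns:
--       A dictionary where keys are letters and values are lists of their indexes.
--   """
--
--   # Hidden maximum length, so user won't overload memory with endless input
--   MAX_LENGTH = 100
--
--   if len(word) > MAX_LENGTH:
--     word = word[:MAX_LENGTH]  # Truncate word if exceeding limit
--
--   letter_indexes = {}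
--   for i in range(len(word)):
--     letter = word[i]
--     if letter not in letter_indexes:
--       letter_indexes[letter] = []
--     letter_indexes[letter].append(i)
--   return letter_indexes
-- ===== SOURCE B (Python) =====
-- def letter_histogram(word):
--     word = word[:100]
--     return {letter: [i for i, c in enumerate(word) if c == letter]
--             for letter in dict.fromkeys(word)}
-- ===== Notes on version B (the rewrite author's own statement) =====
-- stated objective: alternative
-- what changed: Replaces A's single accumulating dict pass (guard-insert then append per index) with a two-phase form: unconditional truncation, ordered-distinct letters via dict.fromkeys, then one index-comprehension scan per distinct letter.
import Mathlib
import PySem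

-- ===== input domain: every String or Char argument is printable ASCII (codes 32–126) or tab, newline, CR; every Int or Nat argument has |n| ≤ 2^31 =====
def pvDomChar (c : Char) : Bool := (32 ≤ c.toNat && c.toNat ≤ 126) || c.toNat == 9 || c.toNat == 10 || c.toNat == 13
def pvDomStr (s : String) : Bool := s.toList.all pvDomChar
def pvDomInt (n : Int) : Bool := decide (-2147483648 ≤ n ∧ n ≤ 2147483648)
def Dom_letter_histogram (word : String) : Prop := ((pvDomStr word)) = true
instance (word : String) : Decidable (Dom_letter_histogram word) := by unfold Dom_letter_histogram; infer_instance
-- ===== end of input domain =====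

-- B replaces A's single accumulating dict pass by a two-phase form: ordered-unique letters first,
-- then a per-letter index comprehension over the truncated word (objective: alternative, same result).

-- ===== PORT A =====
-- A: conditionally truncate to 100 chars, then one pass over range(len(word)) building a dict
-- mapping each letter to the list of its indexes (new key inserted with [] first, then append i).
def letter_histogram (word : String) : List (String × List Int) :=
  let cs : List Char :=
    if (word.toList.length : Int) > 100 then PySem.List.slice word.toList none (some 100)
    else word.toList
  let d : PySem.Dict Char (List Int) :=
    (PySem.List.pyRange 0 (cs.length : Int) 1).foldl
      (fun d i =>
        let letter := PySem.List.pyGetD cs i ' '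
        let d2 := if d.contains letter then d else d.insert letter []
        d2.insert letter (d2.getD letter [] ++ [i]))
      PySem.Dict.empty
  d.items.map (fun p => (String.singleton p.1, p.2))

-- ===== PORT B =====
-- B: word = word[:100]; {letter: [i for i, c in enumerate(word) if c == letter] for letter in dict.fromkeys(word)}
def letter_histogram_alt (word : String) : List (String × List Int) :=
  let cs : List Char := PySem.List.slice word.toList none (some 100)
  (PySem.List.dedup cs).map (fun letter =>
    (String.singleton letter,
     ((PySem.List.enumerate cs 0).filter (fun p => p.2 == letter)).map (·.1)))

-- ===== PRECONDITION & SPEC =====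
def Spec_letter_histogram (word : String) (out : List (String × List Int)) : Prop := out = letter_histogram_alt word
instance (word : String) (out : List (String × List Int)) : Decidable (Spec_letter_histogram word out) := by unfold Spec_letter_histogram; infer_instance

-- ===== CLAIM (what is proved, stated in full; the proofs are below) =====
def Claim_equal_letter_histogram : Prop := ∀ (word : String), Dom_letter_histogram word → Spec_letter_histogram word (letter_histogram word)

-- ===== LEMMAS AND PROOFS =====

-- A's loop body (guard-insert-[] then append i) is exactly Dict.modify letter [] (· ++ [i]).
theorem pv_body_eq_modify (d : PySem.Dict Char (List Int)) (k : Char) (i : Int) :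
    (let d2 := if d.contains k then d else d.insert k []
     d2.insert k (d2.getD k [] ++ [i])) = d.modify k [] (· ++ [i]) := by
  by_cases h : d.contains k = true
  · simp [h, PySem.Dict.modify, PySem.Dict.getD_eq_get?_getD]
  · have h' : d.contains k = false := by simpa using h
    simp [h', PySem.Dict.getD_insert_self, PySem.Dict.insert_insert_self,
      PySem.Dict.modify, PySem.Dict.getD_of_not_contains]

-- Core: A's dict-building pass over t, rendered as items, equals B's per-letter comprehension form.
theorem pv_main (t : List Char) :
    ((PySem.List.pyRange 0 (t.length : Int) 1).foldl
      (fun d i =>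
        let letter := PySem.List.pyGetD t i ' '
        let d2 := if d.contains letter then d else d.insert letter []
        d2.insert letter (d2.getD letter [] ++ [i]))
      PySem.Dict.empty).items
    = (PySem.List.dedup t).map (fun letter =>
        (letter, ((PySem.List.enumerate t 0).filter (fun p => p.2 == letter)).map (·.1))) := by
  have hb : (fun (d : PySem.Dict Char (List Int)) (i : Int) =>
        let letter := PySem.List.pyGetD t i ' '
        let d2 := if d.contains letter then d else d.insert letter []
        d2.insert letter (d2.getD letter [] ++ [i]))
      = fun d i => d.modify (PySem.List.pyGetD t i ' ') [] (· ++ [i]) := by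
    funext d i; exact pv_body_eq_modify d _ i
  rw [hb]
  -- re-express the index loop as a loop over the swapped enumeration
  have hswap : ((PySem.List.enumerate t 0).map Prod.swap).foldl
      (fun (d : PySem.Dict Char (List Int)) p => d.modify p.1 [] (· ++ [p.2])) PySem.Dict.empty
      = (PySem.List.pyRange 0 (t.length : Int) 1).foldl
          (fun d i => d.modify (PySem.List.pyGetD t i ' ') [] (· ++ [i])) PySem.Dict.empty := by
    rw [PySem.List.enumerate_eq_map_pyRange (d := ' '), List.map_map, List.foldl_map]
    rfl
  rw [← hswap]
  set l := PySem.List.enumerate t 0 with hl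
  have hnd : ((l.map Prod.swap).foldl
      (fun (d : PySem.Dict Char (List Int)) p => d.modify p.1 [] (· ++ [p.2])) PySem.Dict.empty).keys.Nodup := by
    exact PySem.Dict.nodup_keys_foldl_modify_key _ _ _ _ _ (by simp)
  have hkeys : ((l.map Prod.swap).foldl
      (fun (d : PySem.Dict Char (List Int)) p => d.modify p.1 [] (· ++ [p.2])) PySem.Dict.empty).keys
      = PySem.List.dedup t := by
    rw [PySem.Dict.keys_foldl_modify_key]
    have hmap : List.map (Prod.fst ∘ Prod.swap) l = t := by
      rw [hl]; simp [Function.comp_def]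
    simp [PySem.Set.update_nil_left, hmap]
  rw [PySem.Dict.items_eq_map_keys _ hnd ([] : List Int), hkeys]
  refine List.map_congr_left (fun c hc => ?_)
  rw [PySem.Dict.getD_foldl_modify_append]
  simp [List.filter_map, List.map_map, Function.comp_def]
-- ===== VERDICT (by name: the statement is the Claim_ definition above) =====
theorem letter_histogram_spec : Claim_equal_letter_histogram := by
  intro word _
  unfold Spec_letter_histogram letter_histogram letter_histogram_alt
  have htrunc : (if ((word.toList.length : Int) > 100) then PySem.List.slice word.toList none (some 100)
      else word.toList) = PySem.List.slice word.toList none (some 100) := by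
    rw [show ((100:Int)) = ((100:Nat):Int) by norm_num, PySem.List.slice_to_natCast]
    split_ifs with h
    · rfl
    · exact (List.take_of_length_le (by omega)).symm
  simp only [htrunc, pv_main, List.map_map]
  rfl
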